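-- pv_equiv track=rewrite | github.com/MInD-Laboratory/MATB-Workload-Classification-Facial-Pose-Data | Pose/utils/nb_utils.py | default_metric
-- ===== SOURCE A (Python) =====
-- from typing import Dict, List
--
-- def default_metric(cols: List[str]) -> str | None:
--     if not cols: return None
--     lowers = [c.lower() for c in cols]
--     prefs = [
--         "blink_aperture_rms", "mouth_aperture_rms", "center_face_magnitude_rms",
--         "blink_aperture_mean_abs_vel", "mouth_aperture_mean_abs_vel",
--     ]
--     for exact in prefs:
--         if exact in lowers:
--             return cols[lowers.index(exact)]
--     for i, lc in enumerate(lowers):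
--         if lc.endswith("_rms"):
--             return cols[i]
--     return cols[0]
-- ===== SOURCE B (Python) =====
-- def default_metric(cols):
--     if not cols:
--         return None
--     rank = {
--         "blink_aperture_rms": 0,
--         "mouth_aperture_rms": 1,
--         "center_face_magnitude_rms": 2,
--         "blink_aperture_mean_abs_vel": 3,
--         "mouth_aperture_mean_abs_vel": 4,
--     }
--     def prio(c):
--         lc = c.lower()
--         return rank.get(lc, 5 if lc.endswith("_rms") else 6)
--     return min(cols, key=prio)
-- ===== Notes on version B (the rewrite author's own statement) =====
-- stated objective: simpler
-- what changed: Replaced A's two sequential search loops over a hard-coded preference list (membership test + .index re-scan per preference, then an enumerate scan for '_rms' suffixes, then a fallback) by a rank table and one single min(cols, key=prio) pass that picks the first column of minimal priority.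
import Mathlib
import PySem

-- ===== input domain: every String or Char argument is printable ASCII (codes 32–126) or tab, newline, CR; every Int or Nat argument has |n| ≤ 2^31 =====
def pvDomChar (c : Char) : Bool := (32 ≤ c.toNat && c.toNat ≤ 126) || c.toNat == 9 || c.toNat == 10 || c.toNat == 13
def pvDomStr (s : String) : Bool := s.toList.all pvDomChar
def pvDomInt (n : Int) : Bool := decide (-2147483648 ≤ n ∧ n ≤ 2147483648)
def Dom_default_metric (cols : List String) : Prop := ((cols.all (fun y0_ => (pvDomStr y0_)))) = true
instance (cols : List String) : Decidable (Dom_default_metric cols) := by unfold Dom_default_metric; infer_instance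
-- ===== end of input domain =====

-- B replaces A's cascade of search loops by a rank table plus a single first-minimum pass (objective: simpler).

-- ===== PORT A =====
def pvPrefs : List String :=
  ["blink_aperture_rms", "mouth_aperture_rms", "center_face_magnitude_rms",
   "blink_aperture_mean_abs_vel", "mouth_aperture_mean_abs_vel"]

-- for exact in prefs: if exact in lowers: return cols[lowers.index(exact)]
def pvLoop1 (cols lowers : List String) : List String → Option String
  | [] => none
  | e :: rest =>
    match PySem.List.index? lowers e with
    | some i => PySem.List.pyGet? cols (i : Int)
    | none => pvLoop1 cols lowers rest

-- for i, lc in enumerate(lowers): if lc.endswith("_rms"): return cols[i]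
def pvLoop2 (cols : List String) (i : Nat) : List String → Option String
  | [] => none
  | lc :: rest =>
    if PySem.Str.endswith lc "_rms" then PySem.List.pyGet? cols (i : Int)
    else pvLoop2 cols (i + 1) rest

def default_metric (cols : List String) : Option String :=
  if cols = [] then none
  else
    let lowers := cols.map PySem.Str.lower
    match pvLoop1 cols lowers pvPrefs with
    | some r => some r
    | none =>
      match pvLoop2 cols 0 lowers with
      | some r => some r
      | none => PySem.List.pyGet? cols (0 : Int)

-- ===== PORT B =====
def pvRank : PySem.Dict String Nat :=
  PySem.Dict.ofList
    [("blink_aperture_rms", 0), ("mouth_aperture_rms", 1), ("center_face_magnitude_rms", 2),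
     ("blink_aperture_mean_abs_vel", 3), ("mouth_aperture_mean_abs_vel", 4)]

def pvPrio (c : String) : Nat :=
  let lc := PySem.Str.lower c
  match PySem.Dict.get? pvRank lc with
  | some r => r
  | none => if PySem.Str.endswith lc "_rms" then 5 else 6

def default_metric_alt (cols : List String) : Option String :=
  if cols = [] then none else PySem.List.min? cols pvPrio

-- ===== PRECONDITION & SPEC =====
def Spec_default_metric (cols : List String) (out : Option String) : Prop := out = default_metric_alt cols
instance (cols : List String) (out : Option String) : Decidable (Spec_default_metric cols out) := by unfold Spec_default_metric; infer_instance

-- ===== CLAIM (what is proved, stated in full; the proofs are below) =====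
def Claim_equal_default_metric : Prop := ∀ (cols : List String), Dom_default_metric cols → Spec_default_metric cols (default_metric cols)

-- ===== LEMMAS AND PROOFS =====

-- pvPrio written out as an if-chain.
set_option maxRecDepth 8192 in
theorem pvPrio_eq (c : String) : pvPrio c =
    (if PySem.Str.lower c = "blink_aperture_rms" then 0
     else if PySem.Str.lower c = "mouth_aperture_rms" then 1
     else if PySem.Str.lower c = "center_face_magnitude_rms" then 2
     else if PySem.Str.lower c = "blink_aperture_mean_abs_vel" then 3
     else if PySem.Str.lower c = "mouth_aperture_mean_abs_vel" then 4
     else if PySem.Str.endswith (PySem.Str.lower c) "_rms" then 5 else 6) := by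
  have h : pvRank = PySem.Dict.mk
      [("blink_aperture_rms", 0), ("mouth_aperture_rms", 1), ("center_face_magnitude_rms", 2),
       ("blink_aperture_mean_abs_vel", 3), ("mouth_aperture_mean_abs_vel", 4)] := by decide
  unfold pvPrio
  rw [h]
  by_cases h1 : PySem.Str.lower c = "blink_aperture_rms"
  · rw [h1]; decide
  rw [if_neg h1]
  by_cases h2 : PySem.Str.lower c = "mouth_aperture_rms"
  · rw [h2]; decide
  rw [if_neg h2]
  by_cases h3 : PySem.Str.lower c = "center_face_magnitude_rms"
  · rw [h3]; decide
  rw [if_neg h3]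
  by_cases h4 : PySem.Str.lower c = "blink_aperture_mean_abs_vel"
  · rw [h4]; decide
  rw [if_neg h4]
  by_cases h5 : PySem.Str.lower c = "mouth_aperture_mean_abs_vel"
  · rw [h5]; decide
  rw [if_neg h5]
  have hnone : (PySem.Dict.mk
      [("blink_aperture_rms", 0), ("mouth_aperture_rms", 1), ("center_face_magnitude_rms", 2),
       ("blink_aperture_mean_abs_vel", 3), ("mouth_aperture_mean_abs_vel", 4)]).get?
        (PySem.Str.lower c) = (none : Option Nat) := by
    simp [PySem.Dict.get?,
      Ne.symm h1, Ne.symm h2, Ne.symm h3, Ne.symm h4, Ne.symm h5]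
  simp only [hnone]

-- the five named preferences, as Boolean facts about pvPrio
theorem pvPrioB0 (c : String) :
    decide (pvPrio c = 0) = (PySem.Str.lower c == "blink_aperture_rms") := by
  rw [pvPrio_eq]; split_ifs <;> simp_all
theorem pvPrioB1 (c : String) :
    decide (pvPrio c = 1) = (PySem.Str.lower c == "mouth_aperture_rms") := by
  rw [pvPrio_eq]; split_ifs <;> simp_all
theorem pvPrioB2 (c : String) :
    decide (pvPrio c = 2) = (PySem.Str.lower c == "center_face_magnitude_rms") := by
  rw [pvPrio_eq]; split_ifs <;> simp_all
theorem pvPrioB3 (c : String) :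
    decide (pvPrio c = 3) = (PySem.Str.lower c == "blink_aperture_mean_abs_vel") := by
  rw [pvPrio_eq]; split_ifs <;> simp_all
theorem pvPrioB4 (c : String) :
    decide (pvPrio c = 4) = (PySem.Str.lower c == "mouth_aperture_mean_abs_vel") := by
  rw [pvPrio_eq]; split_ifs <;> simp_all

theorem pvPrioNe {c : String} {r : Nat} {s : String}
    (hb : decide (pvPrio c = r) = (PySem.Str.lower c == s))
    (hs : ¬ PySem.Str.lower c = s) : ¬ pvPrio c = r := by
  intro h; rw [h] at hb; simp at hb; exact hs hb

-- with none of the five named preferences matching, pvPrio is the suffix test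
theorem pvPrio_big (c : String)
    (n0 : ¬ PySem.Str.lower c = "blink_aperture_rms")
    (n1 : ¬ PySem.Str.lower c = "mouth_aperture_rms")
    (n2 : ¬ PySem.Str.lower c = "center_face_magnitude_rms")
    (n3 : ¬ PySem.Str.lower c = "blink_aperture_mean_abs_vel")
    (n4 : ¬ PySem.Str.lower c = "mouth_aperture_mean_abs_vel") :
    pvPrio c = if PySem.Str.endswith (PySem.Str.lower c) "_rms" then 5 else 6 := by
  rw [pvPrio_eq, if_neg n0, if_neg n1, if_neg n2, if_neg n3, if_neg n4]

-- the fold step of Python's min(,key=)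
def pvStep (p : String → Nat) : Option String → String → Option String
  | none, x => some x
  | some m, x => if p x < p m then some x else some m

theorem pvMinEq (xs : List String) (p : String → Nat) :
    PySem.List.min? xs p = xs.foldl (pvStep p) none := by
  unfold PySem.List.min?
  congr 1
  funext acc x
  cases acc <;> rfl

-- if the accumulator already holds a minimal element, the fold keeps it
theorem pvFoldlMin_stay (p : String → Nat) (k : Nat) :
    ∀ (l : List String) (z : String), (∀ x ∈ l, k ≤ p x) → p z = k →
    List.foldl (pvStep p) (some z) l = some z := by
  intro l
  induction l with
  | nil => intro z _ _; rfl
  | cons y t ih =>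
    intro z hlb hz
    have hy : ¬ p y < p z := by have := hlb y (by simp); omega
    simp only [List.foldl_cons, pvStep, hy]
    exact ih z (fun x hx => hlb x (by simp [hx])) hz

-- if the accumulator is strictly above k, the fold returns the first element at k
theorem pvFoldlMin_find (p : String → Nat) (k : Nat) :
    ∀ (l : List String) (z : String), (∀ x ∈ l, k ≤ p x) → k < p z →
    ∀ m, l.find? (fun x => decide (p x = k)) = some m →
    List.foldl (pvStep p) (some z) l = some m := by
  intro l
  induction l with
  | nil => intro z _ _ m hm; simp at hm
  | cons y t ih =>
    intro z hlb hz m hm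
    by_cases hy : p y = k
    · rw [List.find?_cons_of_pos] at hm
      · have hym : y = m := by injection hm
        subst hym
        have hlt : p y < p z := by omega
        simp only [List.foldl_cons, pvStep, if_pos hlt]
        exact pvFoldlMin_stay p k t y (fun x hx => hlb x (by simp [hx])) hy
      · simp [hy]
    · rw [List.find?_cons_of_neg] at hm
      · have hky : k < p y := by have := hlb y (by simp); omega
        simp only [List.foldl_cons, pvStep]
        by_cases hlt : p y < p z
        · rw [if_pos hlt]
          exact ih y (fun x hx => hlb x (by simp [hx])) hky m hm
        · rw [if_neg hlt]
          exact ih z (fun x hx => hlb x (by simp [hx])) hz m hm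
      · simp [hy]

-- Python's min with key returns the first element attaining the minimal key value
theorem pvMin?_eq_find? (p : String → Nat) (k : Nat) (c : String) (t : List String)
    (hlb : ∀ x ∈ c :: t, k ≤ p x) (hex : ∃ x ∈ c :: t, p x = k) :
    PySem.List.min? (c :: t) p = (c :: t).find? (fun x => decide (p x = k)) := by
  rw [pvMinEq]
  simp only [List.foldl_cons, pvStep]
  by_cases hc : p c = k
  · rw [List.find?_cons_of_pos]
    · exact pvFoldlMin_stay p k t c (fun x hx => hlb x (by simp [hx])) hc
    · simp [hc]
  · rw [List.find?_cons_of_neg]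
    · have hkc : k < p c := by have := hlb c (by simp); omega
      obtain ⟨x, hx, hxk⟩ := hex
      have hxt : x ∈ t := by
        rcases List.mem_cons.mp hx with h | h
        · exact absurd (h ▸ hxk) hc
        · exact h
      cases hm : t.find? (fun x => decide (p x = k)) with
      | none =>
        have := List.find?_eq_none.mp hm x hxt
        simp [hxk] at this
      | some m =>
        exact pvFoldlMin_find p k t c (fun x hx => hlb x (by simp [hx])) hkc m hm
    · simp [hc]

-- find? respects a member-wise equal predicate
theorem pvFind?_congr_mem {α : Type} (l : List α) (p q : α → Bool)
    (h : ∀ x ∈ l, p x = q x) : l.find? p = l.find? q := by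
  induction l with
  | nil => rfl
  | cons y t ih =>
    cases hy : q y with
    | true =>
      rw [List.find?_cons_of_pos, List.find?_cons_of_pos]
      · exact hy
      · rw [h y (by simp)]; exact hy
    | false =>
      rw [List.find?_cons_of_neg, List.find?_cons_of_neg]
      · exact ih (fun x hx => h x (by simp [hx]))
      · simp [hy]
      · rw [h y (by simp)]; simp [hy]

-- B's pass equals find? of the given predicate whenever k is a lower bound and is attained
theorem pvPick (cols : List String) (k : Nat) (pred : String → Bool)
    (hiff : ∀ c ∈ cols, (decide (pvPrio c = k)) = pred c)
    (hlb : ∀ c ∈ cols, k ≤ pvPrio c)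
    (hne : cols ≠ []) (hex : ∃ c ∈ cols, pred c = true) :
    PySem.List.min? cols pvPrio = cols.find? pred := by
  cases cols with
  | nil => exact absurd rfl hne
  | cons c t =>
    rw [pvMin?_eq_find? pvPrio k c t hlb ?_, pvFind?_congr_mem _ _ _ hiff]
    obtain ⟨x, hx, hxp⟩ := hex
    refine ⟨x, hx, ?_⟩
    have := hiff x hx
    rw [hxp] at this
    simpa using this

-- cols[lowers.index(e)] is the first column whose lowercase form is e
theorem pvIdxSome (e : String) :
    ∀ (cols : List String) (i : Nat),
    PySem.List.index? (cols.map PySem.Str.lower) e = some i →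
    PySem.List.pyGet? cols (i : Int) = cols.find? (fun c => PySem.Str.lower c == e) := by
  intro cols
  induction cols with
  | nil => intro i h; simp [PySem.List.index?_eq_idxOf?] at h
  | cons c t ih =>
    intro i h
    by_cases hc : PySem.Str.lower c = e
    · rw [List.map_cons, hc, PySem.List.index?_cons_self] at h
      injection h with h
      subst h
      rw [List.find?_cons_of_pos]
      · simp
      · simp [hc]
    · rw [List.map_cons, PySem.List.index?_cons_of_ne _ hc] at h
      cases hj : PySem.List.index? (t.map PySem.Str.lower) e with
      | none => rw [hj] at h; simp at h
      | some j =>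
        rw [hj] at h
        simp at h
        subst h
        rw [List.find?_cons_of_neg]
        · have := ih j hj
          simp only [PySem.List.pyGet?_natCast] at this ⊢
          simpa using this
        · simp [hc]

-- the second loop is find? of the "_rms"-suffix predicate
theorem pvLoop2_eq :
    ∀ (c2 c1 : List String),
    pvLoop2 (c1 ++ c2) c1.length (c2.map PySem.Str.lower) =
      c2.find? (fun c => PySem.Str.endswith (PySem.Str.lower c) "_rms") := by
  intro c2
  induction c2 with
  | nil => intro c1; rfl
  | cons c t ih =>
    intro c1
    simp only [List.map_cons, pvLoop2]
    by_cases hc : PySem.Str.endswith (PySem.Str.lower c) "_rms" = true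
    · rw [if_pos hc, List.find?_cons_of_pos]
      · rw [PySem.List.pyGet?_natCast]
        simp
      · simpa using hc
    · rw [if_neg hc, List.find?_cons_of_neg]
      · have h1 : c1 ++ c :: t = (c1 ++ [c]) ++ t := by simp
        have h2 : c1.length + 1 = (c1 ++ [c]).length := by simp
        rw [h1, h2, ih (c1 ++ [c])]
      · simpa using hc

-- one preference stage: A's cols[lowers.index(s)] equals B's first-minimum pass
theorem pvStage (cols : List String) (hne : cols ≠ []) (r : Nat) (s : String)
    (hb : ∀ c, decide (pvPrio c = r) = (PySem.Str.lower c == s))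
    (hlb : ∀ c ∈ cols, r ≤ pvPrio c)
    (i : Nat) (hi : PySem.List.index? (cols.map PySem.Str.lower) s = some i) :
    PySem.List.pyGet? cols (i : Int) = PySem.List.min? cols pvPrio := by
  have him : (PySem.List.index? (cols.map PySem.Str.lower) s).isSome = true := by rw [hi]; rfl
  have hmem : s ∈ cols.map PySem.Str.lower := Iff.mp (PySem.List.index?_isSome_iff _ _) him
  obtain ⟨x, hx, hlx⟩ := List.mem_map.mp hmem
  have hbeq : (PySem.Str.lower x == s) = true := by rw [hlx]; simp
  rw [pvIdxSome s cols i hi,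
    pvPick cols r (fun c => PySem.Str.lower c == s) (fun c _ => hb c) hlb hne
      ⟨x, hx, hbeq⟩]

theorem pvMain (cols : List String) (hne : cols ≠ []) :
    default_metric cols = default_metric_alt cols := by
  unfold default_metric default_metric_alt
  rw [if_neg hne, if_neg hne]
  simp only [pvLoop1, pvPrefs]
  by_cases h0 : ∃ x ∈ cols, PySem.Str.lower x = "blink_aperture_rms"
  · cases hi : PySem.List.index? (cols.map PySem.Str.lower) "blink_aperture_rms" with
    | none =>
      rw [PySem.List.index?_eq_none_iff] at hi
      obtain ⟨x, hx, hl⟩ := h0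
      exact absurd (List.mem_map.mpr ⟨x, hx, hl⟩) hi
    | some i =>
      have hlen : i < cols.length := by
        obtain ⟨hk, -, -⟩ := PySem.List.getElem_of_index?_eq_some hi
        simpa using hk
      have hv : PySem.List.pyGet? cols (i : Int) = some cols[i] := by
        rw [PySem.List.pyGet?_natCast]
        simp [hlen]
      have hst := pvStage cols hne 0 _ pvPrioB0 (fun c _ => Nat.zero_le _) i hi
      rw [hv] at hst
      simp only [hv]
      exact hst
  have n0 : PySem.List.index? (cols.map PySem.Str.lower) "blink_aperture_rms" = none :=
    Iff.mpr (PySem.List.index?_eq_none_iff _ _) (fun hm => by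
      obtain ⟨x, hx, hl⟩ := List.mem_map.mp hm
      exact h0 ⟨x, hx, hl⟩)
  simp only [n0]
  by_cases h1 : ∃ x ∈ cols, PySem.Str.lower x = "mouth_aperture_rms"
  · cases hi : PySem.List.index? (cols.map PySem.Str.lower) "mouth_aperture_rms" with
    | none =>
      rw [PySem.List.index?_eq_none_iff] at hi
      obtain ⟨x, hx, hl⟩ := h1
      exact absurd (List.mem_map.mpr ⟨x, hx, hl⟩) hi
    | some i =>
      refine ?_
      have hlen : i < cols.length := by
        obtain ⟨hk, -, -⟩ := PySem.List.getElem_of_index?_eq_some hi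
        simpa using hk
      have hv : PySem.List.pyGet? cols (i : Int) = some cols[i] := by
        rw [PySem.List.pyGet?_natCast]
        simp [hlen]
      have hst := pvStage cols hne 1 _ pvPrioB1 ?_ i hi
      rw [hv] at hst
      simp only [hv]
      exact hst
      intro c hc
      have e0 := pvPrioNe (pvPrioB0 c) (fun hh => h0 ⟨c, hc, hh⟩)
      omega
  have n1 : PySem.List.index? (cols.map PySem.Str.lower) "mouth_aperture_rms" = none :=
    Iff.mpr (PySem.List.index?_eq_none_iff _ _) (fun hm => by
      obtain ⟨x, hx, hl⟩ := List.mem_map.mp hm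
      exact h1 ⟨x, hx, hl⟩)
  simp only [n1]
  by_cases h2 : ∃ x ∈ cols, PySem.Str.lower x = "center_face_magnitude_rms"
  · cases hi : PySem.List.index? (cols.map PySem.Str.lower) "center_face_magnitude_rms" with
    | none =>
      rw [PySem.List.index?_eq_none_iff] at hi
      obtain ⟨x, hx, hl⟩ := h2
      exact absurd (List.mem_map.mpr ⟨x, hx, hl⟩) hi
    | some i =>
      refine ?_
      have hlen : i < cols.length := by
        obtain ⟨hk, -, -⟩ := PySem.List.getElem_of_index?_eq_some hi
        simpa using hk
      have hv : PySem.List.pyGet? cols (i : Int) = some cols[i] := by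
        rw [PySem.List.pyGet?_natCast]
        simp [hlen]
      have hst := pvStage cols hne 2 _ pvPrioB2 ?_ i hi
      rw [hv] at hst
      simp only [hv]
      exact hst
      intro c hc
      have e0 := pvPrioNe (pvPrioB0 c) (fun hh => h0 ⟨c, hc, hh⟩)
      have e1 := pvPrioNe (pvPrioB1 c) (fun hh => h1 ⟨c, hc, hh⟩)
      omega
  have n2 : PySem.List.index? (cols.map PySem.Str.lower) "center_face_magnitude_rms" = none :=
    Iff.mpr (PySem.List.index?_eq_none_iff _ _) (fun hm => by
      obtain ⟨x, hx, hl⟩ := List.mem_map.mp hm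
      exact h2 ⟨x, hx, hl⟩)
  simp only [n2]
  by_cases h3 : ∃ x ∈ cols, PySem.Str.lower x = "blink_aperture_mean_abs_vel"
  · cases hi : PySem.List.index? (cols.map PySem.Str.lower) "blink_aperture_mean_abs_vel" with
    | none =>
      rw [PySem.List.index?_eq_none_iff] at hi
      obtain ⟨x, hx, hl⟩ := h3
      exact absurd (List.mem_map.mpr ⟨x, hx, hl⟩) hi
    | some i =>
      refine ?_
      have hlen : i < cols.length := by
        obtain ⟨hk, -, -⟩ := PySem.List.getElem_of_index?_eq_some hi
        simpa using hk
      have hv : PySem.List.pyGet? cols (i : Int) = some cols[i] := by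
        rw [PySem.List.pyGet?_natCast]
        simp [hlen]
      have hst := pvStage cols hne 3 _ pvPrioB3 ?_ i hi
      rw [hv] at hst
      simp only [hv]
      exact hst
      intro c hc
      have e0 := pvPrioNe (pvPrioB0 c) (fun hh => h0 ⟨c, hc, hh⟩)
      have e1 := pvPrioNe (pvPrioB1 c) (fun hh => h1 ⟨c, hc, hh⟩)
      have e2 := pvPrioNe (pvPrioB2 c) (fun hh => h2 ⟨c, hc, hh⟩)
      omega
  have n3 : PySem.List.index? (cols.map PySem.Str.lower) "blink_aperture_mean_abs_vel" = none :=
    Iff.mpr (PySem.List.index?_eq_none_iff _ _) (fun hm => by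
      obtain ⟨x, hx, hl⟩ := List.mem_map.mp hm
      exact h3 ⟨x, hx, hl⟩)
  simp only [n3]
  by_cases h4 : ∃ x ∈ cols, PySem.Str.lower x = "mouth_aperture_mean_abs_vel"
  · cases hi : PySem.List.index? (cols.map PySem.Str.lower) "mouth_aperture_mean_abs_vel" with
    | none =>
      rw [PySem.List.index?_eq_none_iff] at hi
      obtain ⟨x, hx, hl⟩ := h4
      exact absurd (List.mem_map.mpr ⟨x, hx, hl⟩) hi
    | some i =>
      refine ?_
      have hlen : i < cols.length := by
        obtain ⟨hk, -, -⟩ := PySem.List.getElem_of_index?_eq_some hi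
        simpa using hk
      have hv : PySem.List.pyGet? cols (i : Int) = some cols[i] := by
        rw [PySem.List.pyGet?_natCast]
        simp [hlen]
      have hst := pvStage cols hne 4 _ pvPrioB4 ?_ i hi
      rw [hv] at hst
      simp only [hv]
      exact hst
      intro c hc
      have e0 := pvPrioNe (pvPrioB0 c) (fun hh => h0 ⟨c, hc, hh⟩)
      have e1 := pvPrioNe (pvPrioB1 c) (fun hh => h1 ⟨c, hc, hh⟩)
      have e2 := pvPrioNe (pvPrioB2 c) (fun hh => h2 ⟨c, hc, hh⟩)
      have e3 := pvPrioNe (pvPrioB3 c) (fun hh => h3 ⟨c, hc, hh⟩)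
      omega
  have n4 : PySem.List.index? (cols.map PySem.Str.lower) "mouth_aperture_mean_abs_vel" = none :=
    Iff.mpr (PySem.List.index?_eq_none_iff _ _) (fun hm => by
      obtain ⟨x, hx, hl⟩ := List.mem_map.mp hm
      exact h4 ⟨x, hx, hl⟩)
  simp only [n4]
  -- named preferences absent: A runs its "_rms"-suffix loop
  have hl2 : pvLoop2 cols 0 (cols.map PySem.Str.lower) =
      cols.find? (fun c => PySem.Str.endswith (PySem.Str.lower c) "_rms") := by
    simpa using pvLoop2_eq cols []
  cases hf : cols.find? (fun c => PySem.Str.endswith (PySem.Str.lower c) "_rms") with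
  | some m =>
    have hmm := List.mem_of_find?_eq_some hf
    have hmp : PySem.Str.endswith (PySem.Str.lower m) "_rms" = true := by
      simpa using List.find?_some hf
    simp only [hl2, hf]
    rw [pvPick cols 5 (fun c => PySem.Str.endswith (PySem.Str.lower c) "_rms") ?_ ?_ hne
      ⟨m, hmm, hmp⟩, hf]
    · intro c hc
      show decide (pvPrio c = 5) = PySem.Str.endswith (PySem.Str.lower c) "_rms"
      rw [pvPrio_big c (fun hh => h0 ⟨c, hc, hh⟩) (fun hh => h1 ⟨c, hc, hh⟩)
        (fun hh => h2 ⟨c, hc, hh⟩) (fun hh => h3 ⟨c, hc, hh⟩) (fun hh => h4 ⟨c, hc, hh⟩)]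
      cases PySem.Str.endswith (PySem.Str.lower c) "_rms" <;> decide
    · intro c hc
      rw [pvPrio_big c (fun hh => h0 ⟨c, hc, hh⟩) (fun hh => h1 ⟨c, hc, hh⟩)
        (fun hh => h2 ⟨c, hc, hh⟩) (fun hh => h3 ⟨c, hc, hh⟩) (fun hh => h4 ⟨c, hc, hh⟩)]
      split_ifs <;> omega
  | none =>
    simp only [hl2, hf]
    cases cols with
    | nil => exact absurd rfl hne
    | cons a t =>
      have h6 : ∀ c ∈ a :: t, pvPrio c = 6 := by
        intro c hc
        rw [pvPrio_big c (fun hh => h0 ⟨c, hc, hh⟩) (fun hh => h1 ⟨c, hc, hh⟩)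
          (fun hh => h2 ⟨c, hc, hh⟩) (fun hh => h3 ⟨c, hc, hh⟩) (fun hh => h4 ⟨c, hc, hh⟩),
          if_neg]
        simpa using List.find?_eq_none.mp hf c hc
      rw [pvMin?_eq_find? pvPrio 6 a t (fun x hx => le_of_eq (h6 x hx).symm)
        ⟨a, by simp, h6 a (by simp)⟩]
      rw [List.find?_cons_of_pos]
      · simp
      · simp [h6 a (by simp)]

-- ===== VERDICT (by name: the statement is the Claim_ definition above) =====
theorem default_metric_spec : Claim_equal_default_metric := by
  intro cols _
  unfold Spec_default_metric
  cases h : cols with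
  | nil => rfl
  | cons c t => exact pvMain (c :: t) (by simp)
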